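-- pv_equiv track=rewrite | github.com/MolfarUA/CodeWars_Solutions | 6 kyu/Survivors Ep.4/solution.py | survivors
-- ===== SOURCE A (Python) =====
-- def survivors(list_of_momentum, list_of_powerups):
--     res = []
--     for i,(m,p) in enumerate(zip(list_of_momentum, list_of_powerups)):
--         for x in p:
--             if m == 0:
--                 break
--             m += x-1
--         else:
--             if m:
--                 res.append(i)
--     return res
-- ===== SOURCE B (Python) =====
-- def deadly_starts(p):
--     # the set of starting momenta that die on powerup list p:
--     # m dies iff m == -(sum of (x-1) over some prefix of p), i.e. -m is a running total
--     dead = set()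
--     acc = 0
--     dead.add(acc)
--     for x in p:
--         acc += x - 1
--         dead.add(acc)
--     return dead
--
-- def survivors(list_of_momentum, list_of_powerups):
--     cache = {}
--     res = []
--     for i, (m, p) in enumerate(zip(list_of_momentum, list_of_powerups)):
--         key = tuple(p)
--         dead = cache.get(key)
--         if dead is None:
--             dead = deadly_starts(p)
--             cache[key] = dead
--         if -m not in dead:
--             res.append(i)
--     return res
-- ===== Notes on version B (the rewrite author's own statement) =====
-- stated objective: alternative
-- what changed: Instead of simulating the survivor's momentum, B precomputes from each powerup list alone the set of deadly starting momenta (the negated running totals of x-1), memoizes these sets per distinct powerup list in a dict, and decides each index by one set-membership test -m not in dead.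
import Mathlib
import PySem

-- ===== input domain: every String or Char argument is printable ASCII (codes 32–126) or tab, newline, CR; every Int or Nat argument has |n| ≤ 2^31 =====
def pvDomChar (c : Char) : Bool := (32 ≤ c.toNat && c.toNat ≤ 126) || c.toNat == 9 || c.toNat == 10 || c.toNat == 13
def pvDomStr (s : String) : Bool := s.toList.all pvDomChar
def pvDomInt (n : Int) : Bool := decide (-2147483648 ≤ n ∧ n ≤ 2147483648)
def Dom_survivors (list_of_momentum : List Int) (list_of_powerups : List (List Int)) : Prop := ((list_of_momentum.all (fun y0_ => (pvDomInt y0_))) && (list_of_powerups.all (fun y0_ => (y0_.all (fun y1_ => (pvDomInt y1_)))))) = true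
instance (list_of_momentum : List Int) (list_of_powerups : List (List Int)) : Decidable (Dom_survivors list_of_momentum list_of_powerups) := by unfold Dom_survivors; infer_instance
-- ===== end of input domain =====

-- B replaces A's momentum simulation by precomputing, per distinct powerup list, the set of deadly starting momenta (the negated running totals of x-1), memoized in a dict, with each index decided by one membership test (objective: alternative).


-- ===== PORT A =====
-- inner 'for x in p' loop: none = the loop was left by 'break' (m hit 0), some m' = it completed with final momentum m'
def survInner (m : Int) : List Int → Option Int
  | [] => some m
  | x :: rest => if m = 0 then none else survInner (m + x - 1) rest

-- outer loop over enumerate(zip(...)), accumulating res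
def survGo (i : Int) (res : List Int) : List (Int × List Int) → List Int
  | [] => res
  | (m, p) :: rest =>
      match survInner m p with
      | some m' => survGo (i + 1) (if m' ≠ 0 then res ++ [i] else res) rest
      | none => survGo (i + 1) res rest

def survivors (list_of_momentum : List Int) (list_of_powerups : List (List Int)) : List Int :=
  survGo 0 [] (list_of_momentum.zip list_of_powerups)

-- ===== PORT B =====
-- deadly_starts: dead = set(); acc = 0; dead.add(acc); for x in p: acc += x-1; dead.add(acc)
def deadlyLoop (acc : Int) (dead : PySem.Set Int) : List Int → PySem.Set Int
  | [] => dead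
  | x :: rest => deadlyLoop (acc + x - 1) (dead.add (acc + x - 1)) rest

def deadlyStarts (p : List Int) : PySem.Set Int :=
  deadlyLoop 0 (PySem.Set.add PySem.Set.empty 0) p

-- main loop: state = (cache, res); cache.get(key) then either hit or compute-and-insert
def survGoB (cache : PySem.Dict (List Int) (PySem.Set Int)) (res : List Int) (i : Int) :
    List (Int × List Int) → List Int
  | [] => res
  | (m, p) :: rest =>
      match cache.get? p with
      | some dead =>
          survGoB cache (if PySem.Set.contains dead (-m) then res else res ++ [i]) (i + 1) rest
      | none =>
          let dead := deadlyStarts p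
          survGoB (cache.insert p dead)
            (if PySem.Set.contains dead (-m) then res else res ++ [i]) (i + 1) rest

def survivors_alt (list_of_momentum : List Int) (list_of_powerups : List (List Int)) : List Int :=
  survGoB PySem.Dict.empty [] 0 (list_of_momentum.zip list_of_powerups)

-- ===== PRECONDITION & SPEC =====
def Spec_survivors (list_of_momentum : List Int) (list_of_powerups : List (List Int)) (out : List Int) : Prop := out = survivors_alt list_of_momentum list_of_powerups
instance (list_of_momentum : List Int) (list_of_powerups : List (List Int)) (out : List Int) : Decidable (Spec_survivors list_of_momentum list_of_powerups out) := by unfold Spec_survivors; infer_instance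

-- ===== CLAIM (what is proved, stated in full; the proofs are below) =====
def Claim_equal_survivors : Prop := ∀ (list_of_momentum : List Int) (list_of_powerups : List (List Int)), Dom_survivors list_of_momentum list_of_powerups → Spec_survivors list_of_momentum list_of_powerups (survivors list_of_momentum list_of_powerups)

-- ===== LEMMAS AND PROOFS =====

lemma contains_add_int (s : PySem.Set Int) (x y : Int) :
    PySem.Set.contains (PySem.Set.add s x) y = (PySem.Set.contains s y || decide (y = x)) := by
  by_cases h : y ∈ PySem.Set.add s x
  · rcases (PySem.Set.mem_add s x y).1 h with h' | h' <;>
      simp [PySem.Set.mem_add, h']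
  · have h1 : y ∉ s := fun hs => h ((PySem.Set.mem_add s x y).2 (Or.inl hs))
    have h2 : y ≠ x := fun hx => h ((PySem.Set.mem_add s x y).2 (Or.inr hx))
    simp [PySem.Set.mem_add, h1, h2]

-- membership of -m in the deadly set equals A's inner loop dying (break or final momentum 0)
lemma deadlyLoop_contains (p : List Int) : ∀ (m acc : Int) (s : PySem.Set Int),
    PySem.Set.contains (deadlyLoop acc (PySem.Set.add s acc) p) (-m) =
      (PySem.Set.contains s (-m) ||
        match survInner (m + acc) p with
        | some m' => decide (m' = 0)
        | none => true) := by
  induction p with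
  | nil =>
      intro m acc s
      simp only [deadlyLoop, survInner, contains_add_int]
      congr 1
      exact decide_eq_decide.mpr (by omega)
  | cons x r ih =>
      intro m acc s
      simp only [deadlyLoop, survInner]
      by_cases hm : m + acc = 0
      · have hx : (-m : Int) = acc := by omega
        have := ih m (acc + x - 1) (PySem.Set.add s acc)
        rw [this, contains_add_int, hx]
        simp [hm]
      · have hx : decide ((-m : Int) = acc) = false := by simp; omega
        have heq : m + (acc + x - 1) = m + acc + x - 1 := by ring
        have := ih m (acc + x - 1) (PySem.Set.add s acc)
        rw [this, contains_add_int, hx, heq]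
        simp [hm]

lemma deadlyStarts_contains (m : Int) (p : List Int) :
    PySem.Set.contains (deadlyStarts p) (-m) =
      (match survInner m p with
       | some m' => decide (m' = 0)
       | none => true) := by
  have := deadlyLoop_contains p m 0 PySem.Set.empty
  simp only [deadlyStarts] at *
  rw [this]
  simp [PySem.Set.empty]

-- B's branch on the deadly set equals A's branch on the inner loop's outcome
lemma branch_eq (m i : Int) (p res : List Int) :
    (if PySem.Set.contains (deadlyStarts p) (-m) then res else res ++ [i]) =
      (match survInner m p with
       | some m' => if m' ≠ 0 then res ++ [i] else res
       | none => res) := by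
  rw [deadlyStarts_contains]
  cases h : survInner m p with
  | none => simp
  | some m' => by_cases hz : m' = 0 <;> simp [hz]

def CacheOK (cache : PySem.Dict (List Int) (PySem.Set Int)) : Prop :=
  ∀ k v, cache.get? k = some v → v = deadlyStarts k

lemma survGoB_eq (l : List (Int × List Int)) :
    ∀ (cache : PySem.Dict (List Int) (PySem.Set Int)) (res : List Int) (i : Int),
      CacheOK cache → survGoB cache res i l = survGo i res l := by
  induction l with
  | nil => intro cache res i _; rfl
  | cons hd t ih =>
      intro cache res i hOK
      obtain ⟨m, p⟩ := hd
      simp only [survGoB, survGo]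
      cases h : cache.get? p with
      | some dead =>
          have hd' : dead = deadlyStarts p := hOK p dead h
          simp only [hd', branch_eq m i p res, ih cache _ (i + 1) hOK]
          cases survInner m p <;> simp
      | none =>
          have hOK' : CacheOK (cache.insert p (deadlyStarts p)) := by
            intro k v hk
            rw [PySem.Dict.get?_insert] at hk
            split at hk
            · cases hk; subst ‹k = p›; rfl
            · exact hOK k v hk
          simp only [branch_eq m i p res, ih _ _ (i + 1) hOK']
          cases survInner m p <;> simp

-- ===== VERDICT (by name: the statement is the Claim_ definition above) =====
theorem survivors_spec : Claim_equal_survivors := by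
  intro lm lp _
  unfold Spec_survivors survivors survivors_alt
  exact (survGoB_eq (lm.zip lp) PySem.Dict.empty [] 0 (by intro k v h; simp [PySem.Dict.get?_empty] at h)).symm
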